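-- pv_equiv track=rewrite | github.com/suleman-mahmood/data-mining-ecommerce | Product Hunting/util.py | get_permutations_from_keywords
-- ===== SOURCE A (Python) =====
-- def get_permutations_from_keywords(keywords):
--     keyword_pairs = []
--     keywords_cubes = []
--
--     # Iteratate over all the tuples
--     for i in range(len(keywords)):
--
--         # Iterate from the next word
--         for j in range(len(keywords) - i - 1):
--
--             # Create a new word from first and last word
--             new_word = keywords[i] + " " + keywords[j + i + 1]
--             keyword_pairs.append(new_word)
--
--             # Flip this word also
--             new_word = keywords[j + i + 1] + " " + keywords[i]
--             keyword_pairs.append(new_word)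
--
--     # Iteratate over all the tuples
--     for i in range(len(keywords)):
--
--         # Iterate from the next word
--         for j in range(len(keywords) - i - 1):
--
--             # Iterate from the next to next word
--             for k in range(len(keywords) - i - j - 2):
--
--                 # Create new words from first, second and third word
--
--                 x = keywords[i]
--                 y = keywords[i + j + 1]
--                 z = keywords[i + j + k + 2]
--
--                 new_word = x + " " + y + " " + z
--                 keywords_cubes.append(new_word)
--
--                 new_word = x + " " + z + " " + y
--                 keywords_cubes.append(new_word)
--
--                 new_word = y + " " + x + " " + z
--                 keywords_cubes.append(new_word)
--
--                 new_word = y + " " + z + " " + x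
--                 keywords_cubes.append(new_word)
--
--                 new_word = z + " " + x + " " + y
--                 keywords_cubes.append(new_word)
--
--                 new_word = z + " " + y + " " + x
--                 keywords_cubes.append(new_word)
--
--     return keyword_pairs + keywords_cubes
-- ===== SOURCE B (Python) =====
-- def get_permutations_from_keywords(keywords):
--     # Right fold over the list: walk the keywords from the last to the first,
--     # maintaining (pairs, triples, 2-combinations) of the suffix seen so far.
--     pairs, triples, combos, suffix = [], [], [], []
--     for x in reversed(keywords):
--         pairs = [w for y in suffix for w in (x + " " + y, y + " " + x)] + pairs
--         triples = [w for y, z in combos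
--                    for w in (x + " " + y + " " + z, x + " " + z + " " + y,
--                              y + " " + x + " " + z, y + " " + z + " " + x,
--                              z + " " + x + " " + y, z + " " + y + " " + x)] + triples
--         combos = [(x, y) for y in suffix] + combos
--         suffix = [x] + suffix
--     return pairs + triples
-- ===== Notes on version B (the rewrite author's own statement) =====
-- stated objective: alternative
-- what changed: Replaced the index-arithmetic nested range loops with a single right-to-left fold that maintains the suffix's pairs, triples and 2-combinations as accumulators, so no index arithmetic or length bookkeeping remains.
import Mathlib
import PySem

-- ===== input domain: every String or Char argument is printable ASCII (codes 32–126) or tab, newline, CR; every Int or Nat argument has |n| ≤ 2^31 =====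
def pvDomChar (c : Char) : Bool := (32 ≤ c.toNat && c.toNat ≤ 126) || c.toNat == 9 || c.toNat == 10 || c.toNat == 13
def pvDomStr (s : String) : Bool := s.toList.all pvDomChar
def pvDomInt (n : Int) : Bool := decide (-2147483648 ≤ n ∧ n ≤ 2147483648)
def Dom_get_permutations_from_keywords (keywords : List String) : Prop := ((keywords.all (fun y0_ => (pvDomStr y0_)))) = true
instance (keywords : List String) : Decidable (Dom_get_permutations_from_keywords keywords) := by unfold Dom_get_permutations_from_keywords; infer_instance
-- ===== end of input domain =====

-- B replaces A's index-arithmetic nested range loops by a single right-to-left fold that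
-- maintains the suffix's pairs, triples and 2-combinations as accumulators (objective: alternative).

-- ===== PORT A =====
def get_permutations_from_keywords (keywords : List String) : List String :=
  let keyword_pairs : List String :=
    (PySem.List.pyRange 0 (keywords.length : Int) 1).foldl (fun acc i =>
      (PySem.List.pyRange 0 ((keywords.length : Int) - i - 1) 1).foldl (fun acc j =>
        let new_word := PySem.List.pyGetD keywords i "" ++ " " ++ PySem.List.pyGetD keywords (j + i + 1) ""
        let acc := acc ++ [new_word]
        let new_word := PySem.List.pyGetD keywords (j + i + 1) "" ++ " " ++ PySem.List.pyGetD keywords i ""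
        acc ++ [new_word]) acc) []
  let keywords_cubes : List String :=
    (PySem.List.pyRange 0 (keywords.length : Int) 1).foldl (fun acc i =>
      (PySem.List.pyRange 0 ((keywords.length : Int) - i - 1) 1).foldl (fun acc j =>
        (PySem.List.pyRange 0 ((keywords.length : Int) - i - j - 2) 1).foldl (fun acc k =>
          let x := PySem.List.pyGetD keywords i ""
          let y := PySem.List.pyGetD keywords (i + j + 1) ""
          let z := PySem.List.pyGetD keywords (i + j + k + 2) ""
          let acc := acc ++ [x ++ " " ++ y ++ " " ++ z]
          let acc := acc ++ [x ++ " " ++ z ++ " " ++ y]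
          let acc := acc ++ [y ++ " " ++ x ++ " " ++ z]
          let acc := acc ++ [y ++ " " ++ z ++ " " ++ x]
          let acc := acc ++ [z ++ " " ++ x ++ " " ++ y]
          acc ++ [z ++ " " ++ y ++ " " ++ x]) acc) acc) []
  keyword_pairs ++ keywords_cubes

-- ===== PORT B =====
-- the body of Source B's `for x in reversed(keywords)` loop, on the state (pairs, triples, combos, suffix)
def pvStepB (x : String) (st : List String × List String × List (String × String) × List String) :
    List String × List String × List (String × String) × List String :=
  let (pairs, triples, combos, suffix) := st
  (suffix.flatMap (fun y => [x ++ " " ++ y, y ++ " " ++ x]) ++ pairs,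
   combos.flatMap (fun yz =>
      [x ++ " " ++ yz.1 ++ " " ++ yz.2, x ++ " " ++ yz.2 ++ " " ++ yz.1,
       yz.1 ++ " " ++ x ++ " " ++ yz.2, yz.1 ++ " " ++ yz.2 ++ " " ++ x,
       yz.2 ++ " " ++ x ++ " " ++ yz.1, yz.2 ++ " " ++ yz.1 ++ " " ++ x]) ++ triples,
   suffix.map (fun y => (x, y)) ++ combos,
   x :: suffix)

def get_permutations_from_keywords_alt (keywords : List String) : List String :=
  let st := keywords.foldr pvStepB ([], [], [], [])
  st.1 ++ st.2.1

-- ===== PRECONDITION & SPEC =====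
def Spec_get_permutations_from_keywords (keywords : List String) (out : List String) : Prop := out = get_permutations_from_keywords_alt keywords
instance (keywords : List String) (out : List String) : Decidable (Spec_get_permutations_from_keywords keywords out) := by unfold Spec_get_permutations_from_keywords; infer_instance

-- ===== CLAIM (what is proved, stated in full; the proofs are below) =====
def Claim_equal_get_permutations_from_keywords : Prop := ∀ (keywords : List String), Dom_get_permutations_from_keywords keywords → Spec_get_permutations_from_keywords keywords (get_permutations_from_keywords keywords)

-- ===== LEMMAS AND PROOFS =====

def pvF2 (x y : String) : List String := [x ++ " " ++ y, y ++ " " ++ x]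

def pvF3 (x y z : String) : List String :=
  [x ++ " " ++ y ++ " " ++ z, x ++ " " ++ z ++ " " ++ y,
   y ++ " " ++ x ++ " " ++ z, y ++ " " ++ z ++ " " ++ x,
   z ++ " " ++ x ++ " " ++ y, z ++ " " ++ y ++ " " ++ x]

def pvPairRec (f : String → String → List String) : List String → List String
  | [] => []
  | x :: r => r.flatMap (f x) ++ pvPairRec f r

def pvTripRec (f : String → String → String → List String) : List String → List String
  | [] => []
  | x :: r => pvPairRec (f x) r ++ pvTripRec f r

def pvCombRec : List String → List (String × String)
  | [] => []
  | x :: r => r.map (fun y => (x, y)) ++ pvCombRec r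

theorem pvComb_flatMap (h : String → String → List String) :
    ∀ r : List String, (pvCombRec r).flatMap (fun yz => h yz.1 yz.2) = pvPairRec h r := by
  intro r
  induction r with
  | nil => rfl
  | cons x r ih =>
    simp [pvCombRec, pvPairRec, List.flatMap_append, List.flatMap_map, ih]

theorem pvB_state : ∀ kw : List String,
    kw.foldr pvStepB ([], [], [], []) = (pvPairRec pvF2 kw, pvTripRec pvF3 kw, pvCombRec kw, kw) := by
  intro kw
  induction kw with
  | nil => rfl
  | cons x r ih =>
    simp only [List.foldr_cons, ih, pvStepB, pvPairRec, pvTripRec, pvCombRec]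
    refine Prod.ext ?_ (Prod.ext ?_ rfl)
    · rfl
    · rw [show (fun yz : String × String =>
          [x ++ " " ++ yz.1 ++ " " ++ yz.2, x ++ " " ++ yz.2 ++ " " ++ yz.1,
           yz.1 ++ " " ++ x ++ " " ++ yz.2, yz.1 ++ " " ++ yz.2 ++ " " ++ x,
           yz.2 ++ " " ++ x ++ " " ++ yz.1, yz.2 ++ " " ++ yz.1 ++ " " ++ x])
          = (fun yz : String × String => pvF3 x yz.1 yz.2) from rfl,
        pvComb_flatMap (pvF3 x) r]

theorem pvNatInner (f1 : String → List String) :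
    ∀ r : List String, (List.range r.length).flatMap (fun k => f1 (r.getD k "")) = r.flatMap f1 := by
  intro r
  induction r with
  | nil => rfl
  | cons x r ih =>
    simp only [List.length_cons, List.range_succ_eq_map, List.flatMap_cons, List.flatMap_map]
    simp only [List.getD_cons_zero, List.getD_cons_succ, Nat.succ_eq_add_one]
    rw [ih]

theorem pvPairNat (f : String → String → List String) :
    ∀ s : List String,
      (List.range s.length).flatMap (fun i =>
        (List.range (s.length - i - 1)).flatMap (fun j =>
          f (s.getD i "") (s.getD (j + i + 1) ""))) = pvPairRec f s := by
  intro s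
  induction s with
  | nil => rfl
  | cons x r ih =>
    simp only [List.length_cons, List.range_succ_eq_map, List.flatMap_cons, List.flatMap_map]
    have h0 : (List.range (r.length + 1 - 0 - 1)).flatMap (fun j =>
        f ((x :: r).getD 0 "") ((x :: r).getD (j + 0 + 1) "")) = r.flatMap (f x) := by
      have : r.length + 1 - 0 - 1 = r.length := by omega
      rw [this]
      have : (fun j => f ((x :: r).getD 0 "") ((x :: r).getD (j + 0 + 1) ""))
           = (fun j => (f x) (r.getD j "")) := by
        funext j
        have : j + 0 + 1 = j + 1 := by omega
        rw [this, List.getD_cons_succ, List.getD_cons_zero]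
      rw [this, pvNatInner (f x) r]
    have h1 : (fun i => (List.range (r.length + 1 - Nat.succ i - 1)).flatMap (fun j =>
          f ((x :: r).getD (Nat.succ i) "") ((x :: r).getD (j + Nat.succ i + 1) "")))
        = (fun i => (List.range (r.length - i - 1)).flatMap (fun j =>
          f (r.getD i "") (r.getD (j + i + 1) ""))) := by
      funext i
      have hl : r.length + 1 - Nat.succ i - 1 = r.length - i - 1 := by omega
      rw [hl]
      refine congrArg (fun F => List.flatMap F _) (funext fun j => ?_)
      have h2 : Nat.succ i = i + 1 := rfl
      have h3 : j + Nat.succ i + 1 = (j + i + 1) + 1 := by omega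
      rw [h2, h3, List.getD_cons_succ, List.getD_cons_succ]
    rw [h0, h1, ih, pvPairRec]

theorem pvTripNat (f : String → String → String → List String) :
    ∀ s : List String,
      (List.range s.length).flatMap (fun i =>
        (List.range (s.length - i - 1)).flatMap (fun j =>
          (List.range (s.length - i - j - 2)).flatMap (fun k =>
            f (s.getD i "") (s.getD (i + j + 1) "") (s.getD (i + j + k + 2) "")))) = pvTripRec f s := by
  intro s
  induction s with
  | nil => rfl
  | cons x r ih =>
    simp only [List.length_cons, List.range_succ_eq_map, List.flatMap_cons, List.flatMap_map]
    have h0 : (List.range (r.length + 1 - 0 - 1)).flatMap (fun j =>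
        (List.range (r.length + 1 - 0 - j - 2)).flatMap (fun k =>
          f ((x :: r).getD 0 "") ((x :: r).getD (0 + j + 1) "") ((x :: r).getD (0 + j + k + 2) "")))
        = pvPairRec (f x) r := by
      have hl : r.length + 1 - 0 - 1 = r.length := by omega
      rw [hl]
      have : (fun j => (List.range (r.length + 1 - 0 - j - 2)).flatMap (fun k =>
          f ((x :: r).getD 0 "") ((x :: r).getD (0 + j + 1) "") ((x :: r).getD (0 + j + k + 2) "")))
          = (fun j => (List.range (r.length - j - 1)).flatMap (fun k =>
          (f x) (r.getD j "") (r.getD (k + j + 1) ""))) := by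
        funext j
        have hl2 : r.length + 1 - 0 - j - 2 = r.length - j - 1 := by omega
        rw [hl2]
        refine congrArg (fun F => List.flatMap F _) (funext fun k => ?_)
        have e1 : 0 + j + 1 = j + 1 := by omega
        have e2 : 0 + j + k + 2 = (k + j + 1) + 1 := by omega
        rw [e1, e2, List.getD_cons_zero, List.getD_cons_succ, List.getD_cons_succ]
      rw [this, pvPairNat (f x) r]
    have h1 : (fun i => (List.range (r.length + 1 - Nat.succ i - 1)).flatMap (fun j =>
          (List.range (r.length + 1 - Nat.succ i - j - 2)).flatMap (fun k =>
            f ((x :: r).getD (Nat.succ i) "") ((x :: r).getD (Nat.succ i + j + 1) "")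
              ((x :: r).getD (Nat.succ i + j + k + 2) ""))))
        = (fun i => (List.range (r.length - i - 1)).flatMap (fun j =>
          (List.range (r.length - i - j - 2)).flatMap (fun k =>
            f (r.getD i "") (r.getD (i + j + 1) "") (r.getD (i + j + k + 2) "")))) := by
      funext i
      have hl : r.length + 1 - Nat.succ i - 1 = r.length - i - 1 := by omega
      rw [hl]
      refine congrArg (fun F => List.flatMap F _) (funext fun j => ?_)
      have hl2 : r.length + 1 - Nat.succ i - j - 2 = r.length - i - j - 2 := by omega
      rw [hl2]
      refine congrArg (fun F => List.flatMap F _) (funext fun k => ?_)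
      have e1 : Nat.succ i = i + 1 := rfl
      have e2 : Nat.succ i + j + 1 = (i + j + 1) + 1 := by omega
      have e3 : Nat.succ i + j + k + 2 = (i + j + k + 2) + 1 := by omega
      rw [e1, e2, e3, List.getD_cons_succ, List.getD_cons_succ, List.getD_cons_succ]
    rw [h0, h1, ih, pvTripRec]

-- bridge the Int-indexed pyRange/pyGetD form of A's loops to the Nat-indexed form
theorem pvBridgePairs (kw : List String) (f : String → String → List String) :
    (PySem.List.pyRange 0 (kw.length : Int) 1).flatMap (fun i =>
      (PySem.List.pyRange 0 ((kw.length : Int) - i - 1) 1).flatMap (fun j =>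
        f (PySem.List.pyGetD kw i "") (PySem.List.pyGetD kw (j + i + 1) "")))
    = pvPairRec f kw := by
  rw [PySem.List.pyRange_zero, List.flatMap_map, Int.toNat_natCast]
  rw [← pvPairNat f kw]
  refine congrArg (fun F => List.flatMap F _) (funext fun i => ?_)
  rw [PySem.List.pyRange_zero, List.flatMap_map]
  have hl : (((kw.length : Int) - (i : Int) - 1)).toNat = kw.length - i - 1 := by omega
  rw [hl]
  refine congrArg (fun F => List.flatMap F _) (funext fun j => ?_)
  have e1 : ((j : Int) + (i : Int) + 1) = ((j + i + 1 : Nat) : Int) := by push_cast; ring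
  rw [e1, PySem.List.pyGetD_natCast, PySem.List.pyGetD_natCast]

theorem pvBridgeTrips (kw : List String) (f : String → String → String → List String) :
    (PySem.List.pyRange 0 (kw.length : Int) 1).flatMap (fun i =>
      (PySem.List.pyRange 0 ((kw.length : Int) - i - 1) 1).flatMap (fun j =>
        (PySem.List.pyRange 0 ((kw.length : Int) - i - j - 2) 1).flatMap (fun k =>
          f (PySem.List.pyGetD kw i "") (PySem.List.pyGetD kw (i + j + 1) "")
            (PySem.List.pyGetD kw (i + j + k + 2) ""))))
    = pvTripRec f kw := by
  rw [PySem.List.pyRange_zero, List.flatMap_map, Int.toNat_natCast]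
  rw [← pvTripNat f kw]
  refine congrArg (fun F => List.flatMap F _) (funext fun i => ?_)
  rw [PySem.List.pyRange_zero, List.flatMap_map]
  have hl : (((kw.length : Int) - (i : Int) - 1)).toNat = kw.length - i - 1 := by omega
  rw [hl]
  refine congrArg (fun F => List.flatMap F _) (funext fun j => ?_)
  rw [PySem.List.pyRange_zero, List.flatMap_map]
  have hl2 : (((kw.length : Int) - (i : Int) - (j : Int) - 2)).toNat = kw.length - i - j - 2 := by omega
  rw [hl2]
  refine congrArg (fun F => List.flatMap F _) (funext fun k => ?_)
  have e1 : ((i : Int) + (j : Int) + 1) = ((i + j + 1 : Nat) : Int) := by push_cast; ring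
  have e2 : ((i : Int) + (j : Int) + (k : Int) + 2) = ((i + j + k + 2 : Nat) : Int) := by push_cast; ring
  rw [e1, e2, PySem.List.pyGetD_natCast, PySem.List.pyGetD_natCast, PySem.List.pyGetD_natCast]

-- ===== VERDICT (by name: the statement is the Claim_ definition above) =====
theorem get_permutations_from_keywords_spec : Claim_equal_get_permutations_from_keywords := by
  intro kw _
  unfold Spec_get_permutations_from_keywords
  unfold get_permutations_from_keywords get_permutations_from_keywords_alt
  rw [pvB_state kw]
  simp only [List.append_assoc, List.cons_append, List.nil_append]
  simp only [PySem.List.foldl_append_eq_flatMap]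
  simp only [List.nil_append]
  rw [pvBridgePairs kw (fun a b => [a ++ " " ++ b, b ++ " " ++ a])]
  rw [pvBridgeTrips kw (fun a b c =>
    [a ++ " " ++ b ++ " " ++ c, a ++ " " ++ c ++ " " ++ b,
     b ++ " " ++ a ++ " " ++ c, b ++ " " ++ c ++ " " ++ a,
     c ++ " " ++ a ++ " " ++ b, c ++ " " ++ b ++ " " ++ a])]
  rfl
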